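-- pv_equiv track=rewrite | github.com/Karaoke-as-a-Service/usdbscraper | ultrastartxt.py | set_attr
-- ===== SOURCE A (Python) =====
-- def set_attr(content, value, attr):
--     found = False
--     for line in content:
--         line = line.strip('\n')
--         if line.startswith(f'#{attr}:'):
--             found = True
--             yield f'#{attr}:{value}\n'
--         else:
--             if not found and not line.startswith('#'):
--                 found = True
--                 yield f'#{attr}:{value}\n'
--             yield f'{line}\n'
-- ===== SOURCE B (Python) =====
-- def set_attr(content, value, attr):
--     lines = [l.strip('\n') for l in content]
--     prefix = f'#{attr}:'
--     new_line = f'{prefix}{value}\n'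
--     ins = next((i for i, l in enumerate(lines) if not l.startswith('#')), None)
--     early = ins is not None and any(l.startswith(prefix) for l in lines[:ins])
--     out = []
--     for i, l in enumerate(lines):
--         if i == ins and not early:
--             out.append(new_line)
--         out.append(new_line if l.startswith(prefix) else f'{l}\n')
--     return out
-- ===== Notes on version B (the rewrite author's own statement) =====
-- stated objective: faster
-- what changed: A threads a 'found' flag through one stateful generator loop and rebuilds the f'#{attr}:' prefix and tests it per line; B precomputes the prefix and the replacement line once, computes the insertion index (first non-comment line) and whether an attribute line occurs before it, then emits the output in a separate indexed pass.
import Mathlib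
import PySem

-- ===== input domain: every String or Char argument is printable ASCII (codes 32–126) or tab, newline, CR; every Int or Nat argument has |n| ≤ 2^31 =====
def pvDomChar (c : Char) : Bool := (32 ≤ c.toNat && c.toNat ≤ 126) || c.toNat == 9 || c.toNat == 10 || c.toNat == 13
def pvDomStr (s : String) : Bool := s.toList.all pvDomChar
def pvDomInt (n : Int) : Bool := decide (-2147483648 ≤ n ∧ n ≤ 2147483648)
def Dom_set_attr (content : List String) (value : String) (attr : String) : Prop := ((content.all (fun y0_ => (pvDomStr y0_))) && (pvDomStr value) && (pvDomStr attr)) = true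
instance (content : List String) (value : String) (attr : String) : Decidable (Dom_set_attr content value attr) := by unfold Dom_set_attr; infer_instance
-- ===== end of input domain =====

-- B replaces A's stateful one-pass generator (a 'found' flag threaded through the loop) by an
-- index-first two-pass decomposition: precompute the '#attr:' prefix, the insertion index and
-- whether an early match exists, then emit the lines in a separate pass (measured faster by the
-- timing run; A rebuilds the prefix f-string on every line).

-- ===== PORT A =====
-- the generator's loop: 'found' flag threaded through; the list of yielded lines is returned
def setAttrGo (pre repl : String) (found : Bool) : List String → List String
  | [] => []
  | l :: t =>
    let s := PySem.Str.stripChars l "\n"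
    if PySem.Str.startswith s pre then
      repl :: setAttrGo pre repl true t
    else if !found && !(PySem.Str.startswith s "#") then
      repl :: (s ++ "\n") :: setAttrGo pre repl true t
    else
      (s ++ "\n") :: setAttrGo pre repl found t

def set_attr (content : List String) (value : String) (attr : String) : List String :=
  setAttrGo ("#" ++ attr ++ ":") ("#" ++ attr ++ ":" ++ value ++ "\n") false content

-- ===== PORT B =====
def set_attr_alt (content : List String) (value : String) (attr : String) : List String :=
  let lines := content.map (fun l => PySem.Str.stripChars l "\n")
  let pre := "#" ++ attr ++ ":"
  let newLine := pre ++ value ++ "\n"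
  -- ins = index of the first line not starting with '#' (None if all do)
  let ins? := lines.findIdx? (fun l => !(PySem.Str.startswith l "#"))
  -- early = some line before ins already carries the attribute
  let early := ins?.isSome && (lines.take (ins?.getD 0)).any (fun l => PySem.Str.startswith l pre)
  (PySem.List.enumerate lines).foldl
    (fun out p =>
      (if ((ins?.map (fun (j : Nat) => ((j : Int) == p.1))).getD false && !early) then out ++ [newLine] else out)
      ++ [if PySem.Str.startswith p.2 pre then newLine else p.2 ++ "\n"])
    []

-- ===== PRECONDITION & SPEC =====
def Spec_set_attr (content : List String) (value : String) (attr : String) (out : List String) : Prop := out = set_attr_alt content value attr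
instance (content : List String) (value : String) (attr : String) (out : List String) : Decidable (Spec_set_attr content value attr out) := by unfold Spec_set_attr; infer_instance

-- ===== CLAIM (what is proved, stated in full; the proofs are below) =====
def Claim_equal_set_attr : Prop := ∀ (content : List String) (value : String) (attr : String), Dom_set_attr content value attr → Spec_set_attr content value attr (set_attr content value attr)

-- ===== LEMMAS AND PROOFS =====

-- proof-only abbreviations for B's two precomputed quantities
def bLines (content : List String) : List String :=
  content.map (fun l => PySem.Str.stripChars l "\n")
def bIns (content : List String) : Option Nat :=
  (bLines content).findIdx? (fun l => !(PySem.Str.startswith l "#"))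
def bEarly (content : List String) (attr : String) : Bool :=
  (bIns content).isSome && ((bLines content).take ((bIns content).getD 0)).any
    (fun l => PySem.Str.startswith l ("#" ++ attr ++ ":"))

-- normal form used only by the proofs: B's emission pass with the (decremented) insertion index
def bRun (nl : String) (em : String → String) : Option Nat → Bool → List String → List String
  | _, _, [] => []
  | j?, early, l :: t =>
    (if j? = some 0 ∧ early = false then [nl] else []) ++
      em l :: bRun nl em (j?.bind (fun j => match j with | 0 => none | j+1 => some j)) early t

-- emit of B on an (already stripped) line
def bEmit (pre nl : String) (l : String) : String :=
  if PySem.Str.startswith l pre then nl else l ++ "\n"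

theorem setAttrGo_true (pre repl : String) (ls : List String) :
    setAttrGo pre repl true ls
      = ls.map (fun l => bEmit pre repl (PySem.Str.stripChars l "\n")) := by
  induction ls with
  | nil => rfl
  | cons l t ih =>
    simp only [bEmit] at ih
    simp only [setAttrGo, List.map_cons, bEmit, Bool.not_true, Bool.false_and]
    split_ifs with h h2
    · rw [ih]
    · exact absurd h2 (by simp)
    · rw [ih]

theorem bRun_none (nl : String) (em : String → String) (early : Bool) (ls : List String) :
    bRun nl em none early ls = ls.map em := by
  induction ls with
  | nil => rfl
  | cons l t ih => simp [bRun, ih]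

theorem bRun_early (nl : String) (em : String → String) (j? : Option Nat) (ls : List String) :
    bRun nl em j? true ls = ls.map em := by
  induction ls generalizing j? with
  | nil => rfl
  | cons l t ih => simp [bRun, ih]

theorem foldl_two_appends (nl : String) (em : Int × String → String) (c : Int × String → Bool)
    (ls : List (Int × String)) (acc : List String) :
    ls.foldl (fun out p => (if c p then out ++ [nl] else out) ++ [em p]) acc
      = acc ++ ls.flatMap (fun p => (if c p then [nl] else []) ++ [em p]) := by
  induction ls generalizing acc with
  | nil => simp
  | cons p t ih => by_cases h : c p <;> simp [List.foldl_cons, ih, h]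

theorem flat_noins (nl : String) (em : String → String) (c : Int × String → Bool)
    (ls : List String) (s : Int) (h : ∀ p ∈ PySem.List.enumerate ls s, c p = false) :
    (PySem.List.enumerate ls s).flatMap (fun p => (if c p then [nl] else []) ++ [em p.2])
      = ls.map em := by
  induction ls generalizing s with
  | nil => simp [PySem.List.enumerate_nil]
  | cons l t ih =>
    rw [PySem.List.enumerate_cons]
    simp only [List.flatMap_cons, List.map_cons]
    rw [h (s, l) (by rw [PySem.List.enumerate_cons]; exact List.mem_cons_self),
      ih (s + 1) (fun p hp => h p (by rw [PySem.List.enumerate_cons]; exact List.mem_cons_of_mem _ hp))]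
    simp

theorem flat_eq_bRun (nl : String) (em : String → String) (early : Bool)
    (ls : List String) (j? : Option Nat) (s : Nat) :
    (PySem.List.enumerate ls (s : Int)).flatMap
        (fun p => (if ((j?.map (fun j => (((j + s : Nat) : Int) == p.1))).getD false && !early)
                   then [nl] else []) ++ [em p.2])
      = bRun nl em j? early ls := by
  induction ls generalizing s j? with
  | nil => simp [PySem.List.enumerate_nil, bRun]
  | cons l t ih =>
    cases early with
    | true =>
      rw [bRun_early]
      exact flat_noins nl em _ (l :: t) (s : Int) (fun p hp => by simp)
    | false =>
      rw [PySem.List.enumerate_cons]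
      simp only [List.flatMap_cons, bRun, Bool.not_false, Bool.and_true]
      match j? with
      | none =>
        have htail := ih none (s + 1)
        simp only [Option.map_none, Option.getD_none, Bool.not_false, Bool.and_true,
          Bool.false_eq_true, if_false, List.nil_append, Option.bind_none] at htail ⊢
        rw [show ((s : Int) + 1) = ((s + 1 : Nat) : Int) by push_cast; ring, htail]
        simp
      | some 0 =>
        simp only [Option.map_some, Option.getD_some, Option.bind_some,
          show (((0 + s : Nat) : Int) == ((s : Nat) : Int)) = true from by simp]
        rw [show ((s : Int) + 1) = ((s + 1 : Nat) : Int) by push_cast; ring]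
        have hfn := flat_noins nl em (fun p => (((0 + s : Nat) : Int) == p.1)) t ((s + 1 : Nat) : Int)
          (fun p hp => by
            rcases (PySem.List.mem_enumerate_iff _ _ _).1 hp with ⟨k, hk, rfl⟩
            simp only [beq_eq_false_iff_ne, ne_eq]
            push_cast
            omega)
        rw [bRun_none]
        simpa using hfn
      | some (j+1) =>
        have hh : (((j + 1 + s : Nat) : Int) == ((s : Nat) : Int)) = false := by
          simp only [beq_eq_false_iff_ne, ne_eq]; push_cast; omega
        simp only [Option.map_some, Option.getD_some, Option.bind_some, hh,
          Bool.false_eq_true, if_false, List.nil_append]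
        have htail := ih (some j) (s + 1)
        simp only [Option.map_some, Option.getD_some, Bool.not_false, Bool.and_true] at htail
        simp only [show (j + 1 + s : Nat) = j + (s + 1) from by omega,
          show ((s : Int) + 1) = ((s + 1 : Nat) : Int) from by push_cast; ring]
        simp only [htail]
        simp

-- B unfolded to the bRun normal form
theorem set_attr_alt_eq_bRun (content : List String) (value : String) (attr : String) :
    set_attr_alt content value attr
      = bRun ("#" ++ attr ++ ":" ++ value ++ "\n")
          (bEmit ("#" ++ attr ++ ":") ("#" ++ attr ++ ":" ++ value ++ "\n"))
          (bIns content) (bEarly content attr) (bLines content) := by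
  have h0 := flat_eq_bRun ("#" ++ attr ++ ":" ++ value ++ "\n")
    (bEmit ("#" ++ attr ++ ":") ("#" ++ attr ++ ":" ++ value ++ "\n"))
    (bEarly content attr) (bLines content) (bIns content) 0
  simp only [Nat.add_zero, Nat.cast_zero, bEmit, bLines, bIns, bEarly] at h0
  unfold set_attr_alt bEarly bIns bLines
  rw [foldl_two_appends ("#" ++ attr ++ ":" ++ value ++ "\n")
    (fun p => if PySem.Str.startswith p.2 ("#" ++ attr ++ ":") = true
              then "#" ++ attr ++ ":" ++ value ++ "\n" else p.2 ++ "\n")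
    (fun p => (((content.map (fun l => PySem.Str.stripChars l "\n")).findIdx?
                  (fun l => !(PySem.Str.startswith l "#"))).map (fun (j : Nat) => ((j : Int) == p.1))).getD false
              && !(((content.map (fun l => PySem.Str.stripChars l "\n")).findIdx?
                      (fun l => !(PySem.Str.startswith l "#"))).isSome
                   && ((content.map (fun l => PySem.Str.stripChars l "\n")).take
                        (((content.map (fun l => PySem.Str.stripChars l "\n")).findIdx?
                            (fun l => !(PySem.Str.startswith l "#"))).getD 0)).any
                        (fun l => PySem.Str.startswith l ("#" ++ attr ++ ":"))))]
  rw [List.nil_append]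
  exact h0

theorem startswith_pre_hash (s : String) (attr : String)
    (h : PySem.Str.startswith s ("#" ++ attr ++ ":") = true) :
    PySem.Str.startswith s "#" = true := by
  simp only [PySem.Str.startswith_eq, String.toList_append] at h ⊢
  rw [PySem.Chars.startswith_iff] at h ⊢
  exact List.IsPrefix.trans (show "#".toList <+: "#".toList ++ (attr.toList ++ ":".toList) from ⟨_, rfl⟩) h

-- main induction: A's flag-threaded loop = B's index-first pass
theorem go_eq_bRun (value attr : String) (content : List String) :
    setAttrGo ("#" ++ attr ++ ":") ("#" ++ attr ++ ":" ++ value ++ "\n") false content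
      = bRun ("#" ++ attr ++ ":" ++ value ++ "\n")
          (bEmit ("#" ++ attr ++ ":") ("#" ++ attr ++ ":" ++ value ++ "\n"))
          (bIns content) (bEarly content attr) (bLines content) := by
  induction content with
  | nil => rfl
  | cons h t ih =>
    simp only [bLines, bIns, bEarly, List.map_cons, List.findIdx?_cons] at *
    set nl := "#" ++ attr ++ ":" ++ value ++ "\n" with hnl
    set pre := "#" ++ attr ++ ":" with hpre
    set s := PySem.Str.stripChars h "\n" with hs
    by_cases hhash : PySem.Str.startswith s "#"
    · -- head starts with '#': no insertion at head, index shifts by one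
      have hhashC : PySem.Chars.startswith s.toList ['#'] = true := by simpa using hhash
      simp only [hhash, Bool.not_true, Bool.false_eq_true, if_false]
      by_cases hmatch : PySem.Str.startswith s pre
      · -- head is a match: A switches to found=true; B has early=true (or ins?=none)
        have hmatchC : PySem.Chars.startswith s.toList pre.toList = true := by simpa using hmatch
        rw [show setAttrGo pre nl false (h :: t) = nl :: setAttrGo pre nl true t from by
          simp [setAttrGo, ← hs, hmatchC]]
        rw [setAttrGo_true]
        cases hfi : (t.map (fun l => PySem.Str.stripChars l "\n")).findIdx? (fun l => !(PySem.Str.startswith l "#")) with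
        | none =>
          simp only [Option.map_none, Option.isSome_none, Bool.false_and]
          rw [bRun_none]
          simp [bEmit, hmatchC]
        | some j =>
          simp only [Option.map_some, Option.isSome_some, Bool.true_and,
            Option.getD_some, List.take_succ_cons, List.any_cons, hmatch, Bool.true_or]
          rw [bRun_early]
          simp [bEmit, hmatchC]
      · -- head is a comment but not a match: both sides emit it and recurse
        have hmatchC : PySem.Chars.startswith s.toList pre.toList = false := by simpa using hmatch
        rw [show setAttrGo pre nl false (h :: t) = (s ++ "\n") :: setAttrGo pre nl false t from by
          simp [setAttrGo, ← hs, hmatchC, hhashC]]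
        rw [ih]
        cases hfi : (t.map (fun l => PySem.Str.stripChars l "\n")).findIdx? (fun l => !(PySem.Str.startswith l "#")) with
        | none =>
          simp only [Option.map_none, Option.isSome_none, Bool.false_and]
          simp [bRun, bEmit, hmatchC]
        | some j =>
          simp only [Option.map_some, Option.isSome_some, Bool.true_and,
            Option.getD_some, List.take_succ_cons, List.any_cons, Bool.false_or,
            show PySem.Str.startswith s pre = false from by simpa using hmatch]
          simp [bRun, bEmit, hmatchC]
    · -- head is the first non-comment line: insertion happens here
      have hmatch : PySem.Str.startswith s pre = false := by
        cases hm : PySem.Str.startswith s pre with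
        | false => rfl
        | true => exact absurd (startswith_pre_hash s attr (hpre ▸ hm)) (by simpa using hhash)
      have hmatchC : PySem.Chars.startswith s.toList pre.toList = false := by simpa using hmatch
      have hhashC : PySem.Chars.startswith s.toList ['#'] = false := by simpa using hhash
      rw [show setAttrGo pre nl false (h :: t) = nl :: (s ++ "\n") :: setAttrGo pre nl true t from by
        simp [setAttrGo, ← hs, hmatchC, hhashC]]
      rw [setAttrGo_true]
      simp only [show (!PySem.Str.startswith s "#") = true from by simpa using hhash]
      simp [bRun, bEmit, hmatchC, bRun_none]

-- ===== VERDICT (by name: the statement is the Claim_ definition above) =====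
theorem set_attr_spec : Claim_equal_set_attr := by
  intro content value attr _
  unfold Spec_set_attr
  rw [set_attr_alt_eq_bRun]
  exact go_eq_bRun value attr content
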